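-- pv_equiv track=rewrite | github.com/daniel-reich/ubiquitous-fiesta | D6XfxhRobdQvbKX4v_10.py | first_before_second
-- ===== SOURCE A (Python) =====
-- def first_before_second(s, first, second):
--   secFound = False
--   for let in s:
--     if secFound==True and let==first:
--       return False
--     elif let==second:
--       secFound = True
--   return True
-- ===== SOURCE B (Python) =====
-- def first_before_second(s, first, second):
--     items = list(s)
--     if second not in items:
--         return True
--     i = items.index(second)
--     return first not in items[i+1:]
-- ===== Notes on version B (the rewrite author's own statement) =====
-- stated objective: simpler
-- what changed: Replaces the fused boolean-flag scan with a pivot decomposition: locate the first occurrence of 'second' with list.index and test membership of 'first' in the suffix after it.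
import Mathlib
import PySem

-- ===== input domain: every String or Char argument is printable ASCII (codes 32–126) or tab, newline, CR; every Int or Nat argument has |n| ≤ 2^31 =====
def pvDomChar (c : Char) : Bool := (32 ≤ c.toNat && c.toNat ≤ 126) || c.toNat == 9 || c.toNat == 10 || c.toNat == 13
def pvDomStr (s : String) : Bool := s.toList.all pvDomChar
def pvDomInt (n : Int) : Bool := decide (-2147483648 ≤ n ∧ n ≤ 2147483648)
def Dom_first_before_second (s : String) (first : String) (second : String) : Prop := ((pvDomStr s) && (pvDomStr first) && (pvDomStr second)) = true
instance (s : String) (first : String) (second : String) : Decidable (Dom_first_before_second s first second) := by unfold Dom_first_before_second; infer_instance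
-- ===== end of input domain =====

-- B replaces A's fused boolean-flag scan by a pivot decomposition: find the first
-- occurrence of `second`, then test whether `first` occurs in the suffix after it.

-- ===== PORT A =====
-- for-loop of A: state is the secFound flag; branches in source order
def fbsGo (first second : String) : List Char → Bool → Bool
  | [], _ => true
  | c :: cs, secFound =>
    if secFound == true && String.ofList [c] == first then false
    else if String.ofList [c] == second then fbsGo first second cs true
    else fbsGo first second cs secFound

def first_before_second (s : String) (first : String) (second : String) : Bool :=
  fbsGo first second s.toList false

-- ===== PORT B =====
def first_before_second_alt (s : String) (first : String) (second : String) : Bool :=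
  let items := s.toList.map (fun c => String.ofList [c])
  if !items.contains second then true
  else
    match PySem.List.index? items second with
    | none => true            -- unreachable: guarded by the membership test above
    | some i => !(PySem.List.slice items (some ((i : Int) + 1)) none).contains first

-- ===== PRECONDITION & SPEC =====
def Spec_first_before_second (s : String) (first : String) (second : String) (out : Bool) : Prop := out = first_before_second_alt s first second
instance (s : String) (first : String) (second : String) (out : Bool) : Decidable (Spec_first_before_second s first second out) := by unfold Spec_first_before_second; infer_instance

-- ===== CLAIM (what is proved, stated in full; the proofs are below) =====
def Claim_equal_first_before_second : Prop := ∀ (s : String) (first : String) (second : String), Dom_first_before_second s first second → Spec_first_before_second s first second (first_before_second s first second)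

-- ===== LEMMAS AND PROOFS =====

-- with the flag set, A just scans for `first`
theorem fbsGo_true (first second : String) (l : List Char) :
    fbsGo first second l true = !((l.map (fun c => String.ofList [c])).contains first) := by
  induction l with
  | nil => simp [fbsGo]
  | cons c cs ih =>
    by_cases h : String.ofList [c] = first
    · simp [fbsGo, h]
    · have step : fbsGo first second (c :: cs) true = fbsGo first second cs true := by
        by_cases h2 : String.ofList [c] = second
        · have h' : ¬ second = first := h2 ▸ h
          simp [fbsGo, h2, h']
        · simp [fbsGo, h, h2]
      rw [step, ih, List.map_cons]
      simp [Ne.symm h]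

-- with the flag clear, A equals the pivot decomposition
theorem fbsGo_false (first second : String) (l : List Char) :
    fbsGo first second l false =
      (match PySem.List.index? (l.map (fun c => String.ofList [c])) second with
       | none => true
       | some i => !((l.map (fun c => String.ofList [c])).drop (i + 1)).contains first) := by
  induction l with
  | nil => simp [fbsGo, PySem.List.index?]
  | cons c cs ih =>
    by_cases h2 : String.ofList [c] = second
    · rw [List.map_cons, h2]
      rw [PySem.List.index?_cons_self]
      simp [fbsGo, h2, fbsGo_true]
    · have hne : String.ofList [c] ≠ second := h2
      rw [List.map_cons, PySem.List.index?_cons_of_ne _ hne]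
      have : fbsGo first second (c :: cs) false = fbsGo first second cs false := by
        simp [fbsGo, h2]
      rw [this, ih]
      cases PySem.List.index? (cs.map (fun c => String.ofList [c])) second with
      | none => simp
      | some i => simp [List.drop_succ_cons]

-- ===== VERDICT (by name: the statement is the Claim_ definition above) =====
theorem first_before_second_spec : Claim_equal_first_before_second := by
  intro s first second _
  unfold Spec_first_before_second first_before_second
  simp only [first_before_second_alt]
  rw [fbsGo_false]
  set items := s.toList.map (fun c => String.ofList [c]) with hitems
  by_cases hmem : second ∈ items
  · have hsome : (PySem.List.index? items second).isSome := by
      rw [PySem.List.index?_isSome_iff]; exact hmem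
    obtain ⟨i, hi⟩ := Option.isSome_iff_exists.mp hsome
    have hc : (!items.contains second) = false := by simp [hmem]
    rw [hc]
    simp only [Bool.false_eq_true, if_false]
    rw [hi]
    have hcast : ((i : Int) + 1) = ((i + 1 : Nat) : Int) := by push_cast; ring
    show (!(items.drop (i + 1)).contains first)
        = !(PySem.List.slice items (some ((i : Int) + 1)) none).contains first
    rw [hcast, PySem.List.slice_from_natCast]
  · have hnone : PySem.List.index? items second = none :=
      (PySem.List.index?_eq_none_iff items second).mpr hmem
    rw [hnone]
    simp [hmem]
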